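-- pv_equiv track=rewrite | github.com/Sage-Bionetworks/schematic | schematic/visualization/tangled_tree.py | _move_source_nodes_to_bottom_of_layer
-- ===== SOURCE A (Python) =====
-- NodeLayers = list[list[str]]
--
-- def _move_source_nodes_to_bottom_of_layer(
--     node_layers: NodeLayers, source_nodes: list[str]
-- ) -> NodeLayers:
--     """For aesthetic purposes move source nodes to the bottom of their respective layers.
--     Input:
--         node_layers (NodeLayers): Lists of lists of each layer and the nodes contained
--           in that layer as strings.
--         source_nodes (list[str]): list of nodes that do not have a parent.
--     Output:
--         node_layers (NodeLayers): modified to move source nodes to the bottom of each layer.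
--     """
--     for layer in node_layers:
--         nodes_to_move = []
--         for node in layer:
--             if node in source_nodes:
--                 nodes_to_move.append(node)
--         for node in nodes_to_move:
--             layer.remove(node)
--             layer.append(node)
--     return node_layers
-- ===== SOURCE B (Python) =====
-- def _move_source_nodes_to_bottom_of_layer(node_layers, source_nodes):
--     """Stable partition of each layer: non-source nodes first, then source nodes."""
--     src = set(source_nodes)
--     for layer in node_layers:
--         layer[:] = [n for n in layer if n not in src] + [n for n in layer if n in src]
--     return node_layers
-- ===== Notes on version B (the rewrite author's own statement) =====
-- stated objective: faster
-- what changed: Replaces the per-node quadratic remove/append shuffle (with linear list membership tests) by a single stable partition of each layer — two comprehensions against a set built once — assigned in place via layer[:].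
import Mathlib
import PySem

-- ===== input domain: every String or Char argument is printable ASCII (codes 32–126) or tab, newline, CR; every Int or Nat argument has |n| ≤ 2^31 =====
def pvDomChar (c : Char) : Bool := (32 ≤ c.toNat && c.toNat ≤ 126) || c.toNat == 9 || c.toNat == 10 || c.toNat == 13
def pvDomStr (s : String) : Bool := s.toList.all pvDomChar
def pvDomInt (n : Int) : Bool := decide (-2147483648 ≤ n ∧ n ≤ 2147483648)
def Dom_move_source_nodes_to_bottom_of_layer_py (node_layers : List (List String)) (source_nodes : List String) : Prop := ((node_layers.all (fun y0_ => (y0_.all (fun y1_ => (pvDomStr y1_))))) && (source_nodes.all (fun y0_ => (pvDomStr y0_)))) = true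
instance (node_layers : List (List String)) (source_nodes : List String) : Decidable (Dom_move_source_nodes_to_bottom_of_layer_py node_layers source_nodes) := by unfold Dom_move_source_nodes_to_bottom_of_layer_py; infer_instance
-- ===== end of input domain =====

-- B replaces A's per-node remove-then-append shuffle with a single stable partition of each
-- layer (non-sources then sources), assigned in place via layer[:]; both Pythons mutate the
-- inner lists in place, and the equivalence proved here is about the returned value.

-- ===== PORT A =====
def move_source_nodes_to_bottom_of_layer_py (node_layers : List (List String)) (source_nodes : List String) : List (List String) :=
  node_layers.map (fun layer =>
    -- nodes_to_move = []; for node in layer: if node in source_nodes: nodes_to_move.append(node)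
    let nodes_to_move : List String :=
      layer.foldl (fun acc node => if source_nodes.contains node then acc ++ [node] else acc) []
    -- for node in nodes_to_move: layer.remove(node); layer.append(node)
    nodes_to_move.foldl (fun l node =>
      match PySem.List.remove? l node with
      | some l' => l' ++ [node]
      | none => l ++ [node]   -- ValueError branch of list.remove; unreachable (each move preserves counts)
      ) layer)

-- ===== PORT B =====
def move_source_nodes_to_bottom_of_layer_py_alt (node_layers : List (List String)) (source_nodes : List String) : List (List String) :=
  let src : PySem.Set String := PySem.Set.ofList source_nodes
  node_layers.map (fun layer =>
    layer.filter (fun n => !(PySem.Set.contains src n)) ++ layer.filter (fun n => PySem.Set.contains src n))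

-- ===== PRECONDITION & SPEC =====
def Spec_move_source_nodes_to_bottom_of_layer_py (node_layers : List (List String)) (source_nodes : List String) (out : List (List String)) : Prop := out = move_source_nodes_to_bottom_of_layer_py_alt node_layers source_nodes
instance (node_layers : List (List String)) (source_nodes : List String) (out : List (List String)) : Decidable (Spec_move_source_nodes_to_bottom_of_layer_py node_layers source_nodes out) := by unfold Spec_move_source_nodes_to_bottom_of_layer_py; infer_instance

-- ===== CLAIM (what is proved, stated in full; the proofs are below) =====
def Claim_equal_move_source_nodes_to_bottom_of_layer_py : Prop := ∀ (node_layers : List (List String)) (source_nodes : List String), Dom_move_source_nodes_to_bottom_of_layer_py node_layers source_nodes → Spec_move_source_nodes_to_bottom_of_layer_py node_layers source_nodes (move_source_nodes_to_bottom_of_layer_py node_layers source_nodes)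

-- ===== LEMMAS AND PROOFS =====

-- One move step of A's inner loop.
def pvStep (l : List String) (node : String) : List String :=
  match PySem.List.remove? l node with
  | some l' => l' ++ [node]
  | none => l ++ [node]

-- While every element of ms still has an occurrence left in the prefix s, A's move loop
-- erases from s and appends after the tail t.
lemma foldl_step_eq (ms : List String) : ∀ (s t : List String),
    (∀ m, ms.count m ≤ s.count m) →
    ms.foldl pvStep (s ++ t) = (ms.foldl List.erase s) ++ t ++ ms := by
  induction ms with
  | nil => intro s t _; simp
  | cons m ms ih =>
    intro s t h
    have hm : m ∈ s := by
      have := h m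
      simp [List.count_cons_self] at this
      exact List.count_pos_iff.mp (by omega)
    have hstep : pvStep (s ++ t) m = s.erase m ++ (t ++ [m]) := by
      have hrem : PySem.List.remove? (s ++ t) m = some ((s ++ t).erase m) :=
        PySem.List.remove?_eq_some_erase _ _ (by simp [hm])
      simp [pvStep, hrem, List.erase_append_left _ hm]
    have hcnt : ∀ a, ms.count a ≤ (s.erase m).count a := by
      intro a
      have ha := h a
      rw [List.count_cons] at ha
      rw [List.count_erase]
      by_cases hma : a = m
      · subst hma; simp at ha ⊢; omega
      · have hbeq : (a == m) = false := beq_eq_false_iff_ne.mpr hma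
        have hbeq2 : (m == a) = false := beq_eq_false_iff_ne.mpr (Ne.symm hma)
        simp [hbeq2] at ha ⊢; omega
    calc (m :: ms).foldl pvStep (s ++ t)
        = ms.foldl pvStep (s.erase m ++ (t ++ [m])) := by simp [List.foldl_cons, hstep]
      _ = (ms.foldl List.erase (s.erase m)) ++ (t ++ [m]) ++ ms := ih _ _ hcnt
      _ = ((m :: ms).foldl List.erase s) ++ t ++ (m :: ms) := by simp

-- Filtering cannot increase an element's multiplicity.
lemma count_filter_le (p : String → Bool) (l : List String) (m : String) :
    (l.filter p).count m ≤ l.count m := by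
  induction l with
  | nil => simp
  | cons a l ih =>
    by_cases hp : p a
    · simp only [List.filter_cons, hp, if_true, List.count_cons]
      exact Nat.add_le_add_right ih _
    · simp only [List.filter_cons, hp, List.count_cons]
      exact le_trans ih (Nat.le_add_right _ _)

-- Erasing a value absent from the head skips the head.
lemma foldl_erase_cons (ms : List String) : ∀ (a : String) (s : List String),
    (∀ m ∈ ms, m ≠ a) → ms.foldl List.erase (a :: s) = a :: ms.foldl List.erase s := by
  induction ms with
  | nil => intro a s _; rfl
  | cons m ms ih =>
    intro a s h
    have hma : (a == m) = false := beq_eq_false_iff_ne.mpr (Ne.symm (h m (by simp)))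
    rw [List.foldl_cons, List.erase_cons_tail (by simp [hma]), List.foldl_cons]
    exact ih a (s.erase m) (fun x hx => h x (by simp [hx]))

-- Erasing exactly the p-elements of s from s leaves the non-p-elements.
lemma foldl_erase_filter (p : String → Bool) (s : List String) :
    (s.filter p).foldl List.erase s = s.filter (fun x => !p x) := by
  induction s with
  | nil => rfl
  | cons a s ih =>
    by_cases hp : p a
    · simp [hp, ih]
    · have : (s.filter p).foldl List.erase (a :: s) = a :: (s.filter p).foldl List.erase s := by
        apply foldl_erase_cons
        intro m hm hma
        subst hma
        exact hp (List.of_mem_filter hm)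
      simp [hp, this, ih]

-- A's treatment of one layer is the stable partition.
lemma layer_eq (p : String → Bool) (layer : List String) :
    (layer.filter p).foldl pvStep layer
      = layer.filter (fun x => !p x) ++ layer.filter p := by
  have h := foldl_step_eq (layer.filter p) layer []
    (fun m => count_filter_le p layer m)
  simpa [foldl_erase_filter] using h

-- ===== VERDICT (by name: the statement is the Claim_ definition above) =====
theorem move_source_nodes_to_bottom_of_layer_py_spec : Claim_equal_move_source_nodes_to_bottom_of_layer_py := by
  intro node_layers source_nodes _
  unfold Spec_move_source_nodes_to_bottom_of_layer_py
  unfold move_source_nodes_to_bottom_of_layer_py move_source_nodes_to_bottom_of_layer_py_alt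
  apply List.map_congr_left
  intro layer _
  have hcont : ∀ n, PySem.Set.contains (PySem.Set.ofList source_nodes) n = source_nodes.contains n := by
    intro n
    by_cases hn : n ∈ source_nodes <;>
      simp [PySem.Set.contains_eq_listContains, PySem.Set.mem_ofList, hn]
  simp only [PySem.List.foldl_append_if_eq_filter, List.nil_append, hcont]
  have h := layer_eq (fun n => source_nodes.contains n) layer
  unfold pvStep at h
  exact h
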